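-- pv_equiv track=rewrite | github.com/GiorgioMegrelli/cython-example | setup.py | extract_key_flags
-- ===== SOURCE A (Python) =====
-- from typing import Callable, Dict, List, Optional
--
-- def extract_key_flags(lines: List[str]) -> Dict[str, str]:
--     def is_flag(line: str) -> bool:
--         return line.startswith("-")
--
--     result = {}
--     i = 0
--     while i < len(lines):
--         while i < len(lines) and not is_flag(lines[i]):
--             i += 1
--         if i + 1 < len(lines) and not is_flag(lines[i + 1]):
--             key = lines[i]
--             result[key] = lines[i + 1]
--             i += 1
--         i += 1
--     return result
-- ===== SOURCE B (Python) =====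
-- def extract_key_flags(lines):
--     # Stage 1: split the lines into maximal runs of equal flag-ness.
--     runs = []
--     for line in lines:
--         f = line.startswith("-")
--         if runs and runs[-1][0] == f:
--             runs[-1][1].append(line)
--         else:
--             runs.append((f, [line]))
--     # Stage 2: runs alternate, so each flag run that is followed by another
--     # run maps its last flag to the first line of that (non-flag) run.
--     return {g[-1]: h[0] for (f, g), (_, h) in zip(runs, runs[1:]) if f}
-- ===== Notes on version B (the rewrite author's own statement) =====
-- stated objective: alternative
-- what changed: B works in two stages: it first groups the lines into maximal runs of equal flag-ness, then builds the dict from adjacent run pairs (last flag of a flag run -> first line of the following run), instead of A's single index walk with a nested skip loop and jump-by-2.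
import Mathlib
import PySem

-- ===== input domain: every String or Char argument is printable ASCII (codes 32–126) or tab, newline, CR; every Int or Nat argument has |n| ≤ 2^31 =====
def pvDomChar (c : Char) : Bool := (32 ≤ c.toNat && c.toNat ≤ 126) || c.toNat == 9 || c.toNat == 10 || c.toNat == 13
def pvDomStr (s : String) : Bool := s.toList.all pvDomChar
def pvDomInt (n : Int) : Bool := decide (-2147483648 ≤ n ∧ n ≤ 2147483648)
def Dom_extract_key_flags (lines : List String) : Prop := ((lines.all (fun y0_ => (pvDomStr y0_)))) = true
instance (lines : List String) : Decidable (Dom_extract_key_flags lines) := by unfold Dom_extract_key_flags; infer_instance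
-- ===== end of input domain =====

-- B groups the lines into maximal runs of equal flag-ness and then builds the
-- dict from adjacent run pairs, instead of A's index walk with a nested skip
-- loop; objective: alternative (same cost, different decomposition).


-- ===== PORT A =====
-- helper is_flag from A
def isFlagA (line : String) : Bool := PySem.Str.startswith line "-"

-- A's inner while: advance i past non-flag lines
def skipA (lines : List String) (i : Nat) : Nat :=
  if h : i < lines.length ∧ ¬ isFlagA (lines.getD i "") then skipA lines (i + 1) else i
termination_by lines.length - i
decreasing_by omega

theorem le_skipA (lines : List String) (i : Nat) : i ≤ skipA lines i := by
  fun_induction skipA lines i with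
  | case1 i h ih => omega
  | case2 i h => exact Nat.le_refl i

-- A's outer while loop over index i with the result dict
def loopA (lines : List String) (i : Nat) (d : PySem.Dict String String) :
    PySem.Dict String String :=
  if _h : i < lines.length then
    let j := skipA lines i
    if j + 1 < lines.length ∧ ¬ isFlagA (lines.getD (j + 1) "") then
      loopA lines (j + 2) (d.insert (lines.getD j "") (lines.getD (j + 1) ""))
    else
      loopA lines (j + 1) d
  else d
termination_by lines.length - i
decreasing_by
  · have := le_skipA lines i; omega
  · have := le_skipA lines i; omega

def extract_key_flags (lines : List String) : List (String × String) :=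
  (loopA lines 0 PySem.Dict.empty).items

-- ===== PORT B =====
-- stage 1 of Source B: one step of the run-building loop ('runs[-1]' mutation is
-- ported as dropLast ++ [updated last run])
def runStep (runs : List (Bool × List String)) (line : String) : List (Bool × List String) :=
  let f := PySem.Str.startswith line "-"
  match runs.getLast? with
  | some (f0, g) =>
      if f0 == f then runs.dropLast ++ [(f0, g ++ [line])] else runs ++ [(f, [line])]
  | none => runs ++ [(f, [line])]

def runsOf (lines : List String) : List (Bool × List String) :=
  lines.foldl runStep []

-- stage 2 of Source B: the dict-comprehension step over an adjacent pair of runs.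
-- Every run is nonempty by construction, so Python's g[-1] / h[0] never raise;
-- they are ported as getLastD "" / headD "".
def boundStep (d : PySem.Dict String String)
    (p : (Bool × List String) × (Bool × List String)) : PySem.Dict String String :=
  if p.1.1 then d.insert (p.1.2.getLastD "") (p.2.2.headD "") else d

def extract_key_flags_alt (lines : List String) : List (String × String) :=
  let runs := runsOf lines
  ((runs.zip runs.tail).foldl boundStep PySem.Dict.empty).items

-- ===== PRECONDITION & SPEC =====
def Spec_extract_key_flags (lines : List String) (out : List (String × String)) : Prop := out = extract_key_flags_alt lines
instance (lines : List String) (out : List (String × String)) : Decidable (Spec_extract_key_flags lines out) := by unfold Spec_extract_key_flags; infer_instance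

-- ===== CLAIM (what is proved, stated in full; the proofs are below) =====
def Claim_equal_extract_key_flags : Prop := ∀ (lines : List String), Dom_extract_key_flags lines → Spec_extract_key_flags lines (extract_key_flags lines)

-- ===== LEMMAS AND PROOFS =====

-- ---- A-side: loopA is the fold of stepB over adjacent line pairs ----
def stepB (d : PySem.Dict String String) (p : String × String) : PySem.Dict String String :=
  if isFlagA p.1 && !isFlagA p.2 then d.insert p.1 p.2 else d

-- index-based view of the pair scan, starting at index i
def pairFold (lines : List String) (i : Nat) (d : PySem.Dict String String) :
    PySem.Dict String String :=
  if _h : i + 1 < lines.length then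
    pairFold lines (i + 1) (stepB d (lines.getD i "", lines.getD (i + 1) ""))
  else d
termination_by lines.length - i

theorem pairFold_nonflag (lines : List String) (i : Nat) (d : PySem.Dict String String)
    (hnf : isFlagA (lines.getD i "") = false) :
    pairFold lines i d = pairFold lines (i + 1) d := by
  rw [pairFold]
  split
  · have : stepB d (lines.getD i "", lines.getD (i + 1) "") = d := by
      simp only [stepB]; rw [hnf]; simp
    rw [this]
  · rw [pairFold, dif_neg (by omega)]

theorem pairFold_pair (lines : List String) (j : Nat) (d : PySem.Dict String String)
    (h1 : j + 1 < lines.length) (hf : isFlagA (lines.getD j "") = true)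
    (hnf : isFlagA (lines.getD (j + 1) "") = false) :
    pairFold lines j d =
      pairFold lines (j + 2) (d.insert (lines.getD j "") (lines.getD (j + 1) "")) := by
  rw [pairFold, dif_pos h1]
  have hstep : stepB d (lines.getD j "", lines.getD (j + 1) "") =
      d.insert (lines.getD j "") (lines.getD (j + 1) "") := by
    simp only [stepB]; rw [hf, hnf]; simp
  rw [hstep]
  exact pairFold_nonflag lines (j + 1) _ hnf

theorem pairFold_else (lines : List String) (j : Nat) (d : PySem.Dict String String)
    (h : ¬ (j + 1 < lines.length ∧ ¬ isFlagA (lines.getD (j + 1) "") = true)) :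
    pairFold lines j d = pairFold lines (j + 1) d := by
  by_cases h1 : j + 1 < lines.length
  · have hflag : isFlagA (lines.getD (j + 1) "") = true := by
      by_contra hb
      exact h ⟨h1, hb⟩
    rw [pairFold, dif_pos h1]
    have : stepB d (lines.getD j "", lines.getD (j + 1) "") = d := by
      simp only [stepB]; rw [hflag]; simp
    rw [this]
  · rw [pairFold, dif_neg (by omega), pairFold, dif_neg (by omega)]

theorem pairFold_skipA (lines : List String) (i : Nat) (d : PySem.Dict String String) :
    pairFold lines i d = pairFold lines (skipA lines i) d := by
  fun_induction skipA lines i with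
  | case1 i h ih =>
    rw [pairFold_nonflag lines i d (by simpa using h.2)]
    exact ih
  | case2 i h => rfl

theorem skipA_flag (lines : List String) (i : Nat)
    (h : skipA lines i < lines.length) : isFlagA (lines.getD (skipA lines i) "") = true := by
  fun_induction skipA lines i with
  | case1 i hc ih => exact ih h
  | case2 i hc =>
    by_contra hnf
    exact hc ⟨h, hnf⟩

theorem loopA_eq_pairFold (lines : List String) (i : Nat) (d : PySem.Dict String String) :
    loopA lines i d = pairFold lines i d := by
  fun_induction loopA lines i d with
  | case1 i d hlt j hc ih =>
    rw [ih, pairFold_skipA lines i d]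
    have hflag : isFlagA (lines.getD (skipA lines i) "") = true :=
      skipA_flag lines i (by omega)
    have hnf : isFlagA (lines.getD (j + 1) "") = false := by
      simpa using hc.2
    exact (pairFold_pair lines j d hc.1 hflag hnf).symm
  | case2 i d hlt j hc ih =>
    rw [ih, pairFold_skipA lines i d]
    exact (pairFold_else lines j d hc).symm
  | case3 i d hge =>
    rw [pairFold, dif_neg (by omega)]

theorem foldl_zip_eq_pairFold (lines : List String) (i : Nat)
    (d : PySem.Dict String String) :
    ((lines.drop i).zip (lines.drop (i + 1))).foldl stepB d = pairFold lines i d := by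
  fun_induction pairFold lines i d with
  | case1 i d h ih =>
    have h1 : i < lines.length := by omega
    rw [show (lines.drop i).zip (lines.drop (i + 1)) =
        (lines.getD i "", lines.getD (i + 1) "") ::
          (lines.drop (i + 1)).zip (lines.drop (i + 2)) from by
      rw [List.drop_eq_getElem_cons h1, List.drop_eq_getElem_cons h, List.zip_cons_cons,
        List.getD_eq_getElem lines "" h1, List.getD_eq_getElem lines "" h]]
    rw [List.foldl_cons]
    exact ih
  | case2 i d h =>
    have : lines.drop (i + 1) = [] := List.drop_eq_nil_of_le (by omega)
    simp [this]

-- ---- adjacent pairs as a structural recursion ----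
def adjPairs {α : Type} : List α → List (α × α)
  | [] => []
  | [_] => []
  | a :: b :: t => (a, b) :: adjPairs (b :: t)

theorem zip_tail_eq_adjPairs {α : Type} (l : List α) : l.zip l.tail = adjPairs l := by
  induction l with
  | nil => rfl
  | cons a t ih =>
    cases t with
    | nil => rfl
    | cons b u => simp [adjPairs, ← ih]

theorem adjPairs_append_last {α : Type} (l : List α) (a d : α) (h : l ≠ []) :
    adjPairs (l ++ [a]) = adjPairs l ++ [(l.getLastD d, a)] := by
  induction l with
  | nil => exact absurd rfl h
  | cons x t ih =>
    cases t with
    | nil => simp [adjPairs]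
    | cons b u =>
      have := ih (by simp)
      simp only [List.cons_append, adjPairs] at this ⊢
      rw [this]
      simp [List.getLastD]

-- ---- both folds as a plain insertion fold over a list of key/value pairs ----
def insStep (d : PySem.Dict String String) (p : String × String) : PySem.Dict String String :=
  d.insert p.1 p.2

def pairsA (lines : List String) : List (String × String) :=
  (adjPairs lines).filter (fun p => isFlagA p.1 && !isFlagA p.2)

def toB (p : (Bool × List String) × (Bool × List String)) : Option (String × String) :=
  if p.1.1 then some (p.1.2.getLastD "", p.2.2.headD "") else none

def pairsB (lines : List String) : List (String × String) :=
  (adjPairs (runsOf lines)).filterMap toB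

theorem foldl_stepB_filter (l : List (String × String)) (d : PySem.Dict String String) :
    l.foldl stepB d = (l.filter (fun p => isFlagA p.1 && !isFlagA p.2)).foldl insStep d := by
  induction l generalizing d with
  | nil => rfl
  | cons p t ih =>
    by_cases h : (isFlagA p.1 && !isFlagA p.2) = true
    · simp [stepB, insStep, h, ih]
    · simp [stepB, h, ih]

theorem foldl_boundStep_filterMap (l : List ((Bool × List String) × (Bool × List String)))
    (d : PySem.Dict String String) :
    l.foldl boundStep d = (l.filterMap toB).foldl insStep d := by
  induction l generalizing d with
  | nil => rfl
  | cons p t ih =>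
    by_cases h : p.1.1 = true
    · simp [boundStep, toB, insStep, h, ih]
    · simp [boundStep, toB, h, ih]

-- ---- the run invariant and pairsB = pairsA, by induction from the right ----
def lastInfo (r : Bool × List String) : Bool × String := (r.1, r.2.getLastD "")

theorem runs_invariant (lines : List String) :
    (∀ r ∈ runsOf lines, r.2 ≠ []) ∧
    (runsOf lines).getLast?.map lastInfo
      = lines.getLast?.map (fun a => (isFlagA a, a)) ∧
    pairsB lines = pairsA lines := by
  induction lines using List.reverseRecOn with
  | nil => exact ⟨by simp [runsOf], by simp [runsOf], rfl⟩
  | append_singleton l a ih =>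
    obtain ⟨hne, hlast, hpairs⟩ := ih
    have hstep : runsOf (l ++ [a]) = runStep (runsOf l) a := by
      simp [runsOf, List.foldl_append]
    cases hl : l.getLast? with
    | none =>
      -- l = []
      have hl0 : l = [] := by cases l with | nil => rfl | cons x t => simp at hl
      subst hl0
      refine ⟨?_, ?_, ?_⟩ <;>
        simp [runsOf, runStep, pairsA, pairsB, adjPairs, lastInfo, isFlagA]
    | some w =>
      have hlne : l ≠ [] := by intro h; subst h; simp at hl
      -- the last run of runsOf l
      cases hr : (runsOf l).getLast? with
      | none => rw [hr] at hlast; rw [hl] at hlast; simp at hlast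
      | some r =>
        obtain ⟨f0, g⟩ := r
        rw [hr, hl] at hlast
        simp [lastInfo] at hlast
        obtain ⟨hf0, hg⟩ := hlast
        have hrne : runsOf l ≠ [] := by intro h; rw [h] at hr; simp at hr
        have hgne : g ≠ [] := hne _ (List.mem_of_getLast? hr)
        have hdecomp : runsOf l = (runsOf l).dropLast ++ [(f0, g)] := by
          conv_lhs => rw [← List.dropLast_append_getLast hrne]
          rw [show (runsOf l).getLast hrne = (f0, g) from by
            have := List.getLast?_eq_some_getLast (l := runsOf l) hrne
            rw [hr] at this; exact (Option.some_inj.mp this.symm)]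
        have hstep' : runStep (runsOf l) a =
            if f0 == isFlagA a then (runsOf l).dropLast ++ [(f0, g ++ [a])]
            else runsOf l ++ [(isFlagA a, [a])] := by
          simp [runStep, hr, isFlagA]
        -- pairsA on l ++ [a]
        have hpa : pairsA (l ++ [a]) = pairsA l ++
            (if isFlagA w && !isFlagA a then [(w, a)] else []) := by
          have : l.getLastD "" = w := by simp [List.getLastD_eq_getLast?, hl]
          simp only [pairsA, adjPairs_append_last l a "" hlne, List.filter_append, this]
          by_cases hc : (isFlagA w && !isFlagA a) = true <;> simp [hc]
        by_cases hfa : f0 = isFlagA a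
        · -- same flag-ness: extend the last run; no new boundary, no new pair
          have hrw : runsOf (l ++ [a]) = (runsOf l).dropLast ++ [(f0, g ++ [a])] := by
            rw [hstep, hstep', if_pos (by simp [hfa])]
          refine ⟨?_, ?_, ?_⟩
          · intro r hmem
            rw [hrw] at hmem
            rcases List.mem_append.mp hmem with hmem | hmem
            · exact hne _ (List.mem_of_mem_dropLast hmem)
            · simp at hmem; subst hmem; simp
          · rw [hrw]
            simp [lastInfo, hfa]
          · -- the new pair (w, a) has equal flag-ness, so it is filtered out in pairsA;
            -- and pairsB is unchanged because only the last run's tail grew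
            have hpa' : pairsA (l ++ [a]) = pairsA l := by
              rw [hpa, if_neg]
              · simp
              · rw [← hf0, hfa]; cases isFlagA a <;> simp
            rw [hpa', ← hpairs]
            unfold pairsB
            rw [hrw]
            by_cases hdl : (runsOf l).dropLast = []
            · rw [hdl]
              conv_rhs => rw [hdecomp, hdl]
              simp [adjPairs]
            · rw [adjPairs_append_last _ _ (false, []) hdl]
              conv_rhs => rw [hdecomp, adjPairs_append_last _ _ (false, []) hdl]
              rw [List.filterMap_append, List.filterMap_append]
              congr 1
              simp only [List.filterMap]
              rw [show toB ((runsOf l).dropLast.getLastD (false, []), (f0, g ++ [a]))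
                  = toB ((runsOf l).dropLast.getLastD (false, []), (f0, g)) from by
                unfold toB
                obtain ⟨x, t, rfl⟩ : ∃ x t, g = x :: t := by
                  cases g with
                  | nil => exact absurd rfl hgne
                  | cons x t => exact ⟨x, t, rfl⟩
                simp]
        · -- different flag-ness: a new run; one new boundary iff the old run is a flag run
          have hrw : runsOf (l ++ [a]) = runsOf l ++ [(isFlagA a, [a])] := by
            rw [hstep, hstep', if_neg (by simp [hfa])]
          refine ⟨?_, ?_, ?_⟩
          · intro r hmem
            rw [hrw] at hmem
            rcases List.mem_append.mp hmem with hmem | hmem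
            · exact hne _ hmem
            · simp at hmem; subst hmem; simp
          · rw [hrw]; simp [lastInfo]
          · have hglast : (runsOf l).getLastD (false, []) = (f0, g) := by
              simp [List.getLastD_eq_getLast?, hr]
            unfold pairsB
            rw [hrw, adjPairs_append_last _ _ (false, []) hrne, List.filterMap_append,
              hglast, hpa]
            have hpB : pairsB l = (adjPairs (runsOf l)).filterMap toB := rfl
            rw [← hpB, hpairs]
            congr 1
            simp only [List.filterMap]
            unfold toB
            cases hf : f0 with
            | false =>
              have : isFlagA w = false := by rw [← hf0, hf]
              simp [this]
            | true =>
              have hw : isFlagA w = true := by rw [← hf0, hf]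
              have ha : isFlagA a = false := by
                cases hfa' : isFlagA a
                · rfl
                · exact absurd (by rw [hf, hfa']) hfa
              simp [hw, ha, hg]

-- ===== VERDICT (by name: the statement is the Claim_ definition above) =====
theorem extract_key_flags_spec : Claim_equal_extract_key_flags := by
  intro lines _
  unfold Spec_extract_key_flags extract_key_flags extract_key_flags_alt
  rw [loopA_eq_pairFold]
  rw [← foldl_zip_eq_pairFold lines 0 PySem.Dict.empty]
  simp only [List.drop_zero, Nat.zero_add, List.drop_one]
  rw [zip_tail_eq_adjPairs, zip_tail_eq_adjPairs, foldl_stepB_filter,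
    foldl_boundStep_filterMap]
  have := (runs_invariant lines).2.2
  unfold pairsB pairsA at this
  rw [this]
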